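-- pv_equiv track=rewrite | github.com/biofe/coevo_pipeline | coevo/sequences/motif_detection.py | _ungapped_to_aligned_index
-- ===== SOURCE A (Python) =====
-- def _ungapped_to_aligned_index(sequence: str, ungapped_idx: int) -> int | None:
--     """Return the aligned index for the n-th (0-based) non-gap character.
--
--     Iterates through *sequence* counting non-``'-'`` characters.  When the
--     *ungapped_idx*-th non-gap character is reached its position in the aligned
--     string is returned.  Returns ``None`` if *ungapped_idx* is beyond the last
--     non-gap character.
--
--     Example::
--
--         sequence    = "A-CG"
--         ungapped[0] = 'A'  -> aligned index 0
--         ungapped[1] = 'C'  -> aligned index 2   (gap at index 1 is skipped)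
--         ungapped[2] = 'G'  -> aligned index 3
--
--     Parameters
--     ----------
--     sequence:
--         Aligned sequence string, potentially containing ``-`` gap characters.
--     ungapped_idx:
--         Zero-based index in the ungapped (gap-stripped) sequence.
--
--     Returns
--     -------
--     int or None
--         Position in the aligned sequence, or ``None`` if *ungapped_idx* is
--         beyond the last non-gap character.
--     """
--     count = 0
--     for i, ch in enumerate(sequence):
--         if ch != "-":
--             if count == ungapped_idx:
--                 return i
--             count += 1
--     return None
-- ===== SOURCE B (Python) =====
-- def _ungapped_to_aligned_index(sequence: str, ungapped_idx: int) -> int | None: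
--     positions = [i for i, ch in enumerate(sequence) if ch != "-"]
--     if 0 <= ungapped_idx < len(positions):
--         return positions[ungapped_idx]
--     return None
-- ===== Notes on version B (the rewrite author's own statement) =====
-- stated objective: simpler
-- what changed: Replaces the running-counter loop with an early return by building the list of non-gap positions once and doing a single bounds-checked lookup into it.
import Mathlib
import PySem

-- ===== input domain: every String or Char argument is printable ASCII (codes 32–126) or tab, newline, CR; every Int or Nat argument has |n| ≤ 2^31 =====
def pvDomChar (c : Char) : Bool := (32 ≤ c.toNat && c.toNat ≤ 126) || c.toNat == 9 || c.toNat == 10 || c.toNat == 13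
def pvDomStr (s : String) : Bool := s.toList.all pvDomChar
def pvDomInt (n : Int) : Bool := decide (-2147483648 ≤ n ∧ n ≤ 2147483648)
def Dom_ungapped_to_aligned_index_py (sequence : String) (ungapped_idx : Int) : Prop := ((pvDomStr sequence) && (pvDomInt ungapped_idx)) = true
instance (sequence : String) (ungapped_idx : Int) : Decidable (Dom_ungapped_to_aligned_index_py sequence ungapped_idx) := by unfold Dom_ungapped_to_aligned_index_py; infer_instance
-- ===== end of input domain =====

-- B builds the list of non-gap positions once and does a bounds-checked lookup,
-- replacing A's running counter with early exit; objective: simpler.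

-- ===== PORT A =====
-- A's loop: running count of non-gap chars, return aligned index i when count hits ungapped_idx.
def pvGoA (cs : List Char) (i : Int) (count : Int) (target : Int) : Option Int :=
  match cs with
  | [] => none
  | c :: rest =>
    if c ≠ '-' then
      if count = target then some i else pvGoA rest (i + 1) (count + 1) target
    else
      pvGoA rest (i + 1) count target

def ungapped_to_aligned_index_py (sequence : String) (ungapped_idx : Int) : Option Int :=
  pvGoA sequence.toList 0 0 ungapped_idx

-- ===== PORT B =====
-- positions = [i for i, ch in enumerate(sequence) if ch != '-']
def pvPositions (cs : List Char) (start : Int) : List Int :=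
  (PySem.List.enumerate cs start).filterMap (fun p => if p.2 ≠ '-' then some p.1 else none)

def ungapped_to_aligned_index_py_alt (sequence : String) (ungapped_idx : Int) : Option Int :=
  let positions := pvPositions sequence.toList 0
  if 0 ≤ ungapped_idx ∧ ungapped_idx < (positions.length : Int) then
    positions[ungapped_idx.toNat]?
  else
    none

-- ===== PRECONDITION & SPEC =====
def Spec_ungapped_to_aligned_index_py (sequence : String) (ungapped_idx : Int) (out : Option Int) : Prop := out = ungapped_to_aligned_index_py_alt sequence ungapped_idx
instance (sequence : String) (ungapped_idx : Int) (out : Option Int) : Decidable (Spec_ungapped_to_aligned_index_py sequence ungapped_idx out) := by unfold Spec_ungapped_to_aligned_index_py; infer_instance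

-- ===== CLAIM (what is proved, stated in full; the proofs are below) =====
def Claim_equal_ungapped_to_aligned_index_py : Prop := ∀ (sequence : String) (ungapped_idx : Int), Dom_ungapped_to_aligned_index_py sequence ungapped_idx → Spec_ungapped_to_aligned_index_py sequence ungapped_idx (ungapped_to_aligned_index_py sequence ungapped_idx)

-- ===== LEMMAS AND PROOFS =====

theorem pvPositions_cons (c : Char) (cs : List Char) (i : Int) :
    pvPositions (c :: cs) i =
      if c ≠ '-' then i :: pvPositions cs (i + 1) else pvPositions cs (i + 1) := by
  simp only [pvPositions, PySem.List.enumerate_cons, List.filterMap_cons]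
  split_ifs <;> simp_all

theorem pvGoA_eq (cs : List Char) (i count target : Int) :
    pvGoA cs i count target =
      (if count ≤ target ∧ target < count + ((pvPositions cs i).length : Int) then
        (pvPositions cs i)[(target - count).toNat]?
      else none) := by
  induction cs generalizing i count with
  | nil =>
    simp only [pvGoA, pvPositions, PySem.List.enumerate_nil, List.filterMap_nil,
      List.length_nil]
    rw [if_neg (by push_cast; omega)]
  | cons c rest ih =>
    rw [pvPositions_cons]
    by_cases hc : c ≠ '-'
    · simp only [pvGoA, if_pos hc]
      by_cases ht : count = target
      · rw [if_pos ht, if_pos ⟨by omega, by simp only [List.length_cons]; push_cast; omega⟩]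
        have h0 : (target - count).toNat = 0 := by omega
        rw [h0]
        simp
      · rw [if_neg ht, ih]
        by_cases h1 : count + 1 ≤ target ∧ target < count + 1 + ((pvPositions rest (i + 1)).length : Int)
        · rw [if_pos h1, if_pos (by simp only [List.length_cons]; push_cast; omega)]
          have hk : (target - count).toNat = (target - (count + 1)).toNat + 1 := by omega
          rw [hk]
          simp
        · rw [if_neg h1, if_neg (by simp only [List.length_cons]; push_cast; omega)]
    · simp only [pvGoA, hc, if_false]
      exact ih ..

theorem ungapped_eq (sequence : String) (ungapped_idx : Int) :
    ungapped_to_aligned_index_py sequence ungapped_idx =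
      ungapped_to_aligned_index_py_alt sequence ungapped_idx := by
  unfold ungapped_to_aligned_index_py ungapped_to_aligned_index_py_alt
  rw [pvGoA_eq]
  simp only [Int.sub_zero, Int.zero_add]

-- ===== VERDICT (by name: the statement is the Claim_ definition above) =====
theorem ungapped_to_aligned_index_py_spec : Claim_equal_ungapped_to_aligned_index_py := by
  intro s k _
  exact ungapped_eq s k
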